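-- pv_equiv track=rewrite | github.com/OpenInterpreter/open-interpreter | venv/lib/python3.10/site-packages/rapidfuzz/distance/LCSseq_py.py | _block_similarity
-- ===== SOURCE A (Python) =====
-- from typing import Callable, Hashable, Sequence
--
-- def _block_similarity(
--     block: dict[Hashable, int],
--     s1: Sequence[Hashable],
--     s2: Sequence[Hashable],
--     score_cutoff: int | None = None,
-- ) -> int:
--     if not s1:
--         return 0
--
--     S = (1 << len(s1)) - 1
--     block_get = block.get
--
--     for ch2 in s2:
--         Matches = block_get(ch2, 0)
--         u = S & Matches
--         S = (S + u) | (S - u)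
--
--     # calculate the equivalent of popcount(~S) in C. This breaks for len(s1) == 0
--     res = bin(S)[-len(s1) :].count("0")
--     return res if (score_cutoff is None or res >= score_cutoff) else 0
-- ===== SOURCE B (Python) =====
-- # Classic row-by-row dynamic-programming LCS (match bits read from `block`),
-- # replacing the bit-parallel integer algorithm; same cutoff handling.
-- from typing import Hashable, Sequence
--
--
-- def _block_similarity(
--     block: dict,
--     s1: Sequence[Hashable],
--     s2: Sequence[Hashable],
--     score_cutoff: "int | None" = None,
-- ) -> int:
--     if not s1:
--         return 0
--     row = [0] * (len(s1) + 1)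
--     for ch2 in s2:
--         mbits = block.get(ch2, 0)
--         prev = 0
--         new = [0]
--         for diag, above in zip(row, row[1:]):
--             if mbits & 1:
--                 prev = diag + 1
--             else:
--                 prev = max(prev, above)
--             new.append(prev)
--             mbits >>= 1
--         row = new
--     res = row[len(s1)]
--     return res if (score_cutoff is None or res >= score_cutoff) else 0
-- ===== Notes on version B (the rewrite author's own statement) =====
-- stated objective: alternative
-- what changed: Replaces the bit-parallel big-integer LCS (carry/borrow arithmetic on a bitmask plus a popcount of the binary string) with the classic dynamic-programming LCS row recurrence whose match tests read the same bits of block.get(ch2, 0); B trades A's word-parallel speed for a plain quadratic DP; the empty-s1 early return and score_cutoff handling are unchanged.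
import Mathlib
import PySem

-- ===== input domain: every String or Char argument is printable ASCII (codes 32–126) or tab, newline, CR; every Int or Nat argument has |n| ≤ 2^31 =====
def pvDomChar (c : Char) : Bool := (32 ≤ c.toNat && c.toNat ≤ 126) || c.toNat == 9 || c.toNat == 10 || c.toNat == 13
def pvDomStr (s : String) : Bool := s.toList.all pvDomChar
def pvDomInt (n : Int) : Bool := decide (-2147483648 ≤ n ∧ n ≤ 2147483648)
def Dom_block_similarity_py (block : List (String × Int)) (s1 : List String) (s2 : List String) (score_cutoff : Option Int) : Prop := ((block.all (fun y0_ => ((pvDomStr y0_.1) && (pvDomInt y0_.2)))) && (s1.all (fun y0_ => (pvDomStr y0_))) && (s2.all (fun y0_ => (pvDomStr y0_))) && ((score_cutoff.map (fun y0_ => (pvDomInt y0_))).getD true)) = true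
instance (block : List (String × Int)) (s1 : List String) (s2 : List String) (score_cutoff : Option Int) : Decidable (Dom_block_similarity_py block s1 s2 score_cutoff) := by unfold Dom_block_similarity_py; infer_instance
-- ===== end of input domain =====

-- B replaces the bit-parallel big-integer LCS with the classic DP row recurrence
-- (match tests read the same bits of block.get(ch2, 0)); objective: alternative algorithm.

-- ===== PORT A =====
-- literal port of _block_similarity (bit-parallel; bin(S)[-len(s1):].count("0"))
def block_similarity_py (block : List (String × Int)) (s1 : List String) (s2 : List String) (score_cutoff : Option Int) : Int :=
  if s1 = [] then 0
  else
    let S : Int := s2.foldl (fun S ch2 =>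
      let Matches : Int := (block.lookup ch2).getD 0
      let u : Int := PySem.Int.band S Matches
      PySem.Int.bor (S + u) (S - u)) ((1 <<< s1.length) - 1)
    -- bin(S)[-len(s1):].count("0")
    let res : Int := (PySem.Str.count (PySem.Str.slice (PySem.Int.pyBin S) (some (-(s1.length : Int))) none) "0" : Nat)
    match score_cutoff with
    | none => res
    | some cutoff => if res ≥ cutoff then res else 0

-- ===== PORT B =====
def block_similarity_py_alt (block : List (String × Int)) (s1 : List String) (s2 : List String) (score_cutoff : Option Int) : Int :=
  if s1 = [] then 0
  else
    -- inner loop: for diag, above in zip(row, row[1:]): ... ; state = (mbits, prev, new)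
    let row : List Int := s2.foldl (fun row ch2 =>
      ((List.zip row (PySem.List.slice row (some 1) none)).foldl
        (fun (st : Int × Int × List Int) p =>
          let prev : Int := if PySem.Int.band st.1 1 = 1 then p.1 + 1 else max st.2.1 p.2
          (st.1 >>> (1 : Nat), prev, st.2.2 ++ [prev]))
        ((block.lookup ch2).getD 0, 0, [0])).2.2) (List.replicate (s1.length + 1) 0)
    -- row[len(s1)]: always in range (the row keeps length len(s1)+1), so getD 0 is never used
    let res : Int := (PySem.List.pyGet? row (s1.length : Int)).getD 0
    match score_cutoff with
    | none => res
    | some cutoff => if res ≥ cutoff then res else 0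

-- ===== PRECONDITION & SPEC =====
def Spec_block_similarity_py (block : List (String × Int)) (s1 : List String) (s2 : List String) (score_cutoff : Option Int) (out : Int) : Prop := out = block_similarity_py_alt block s1 s2 score_cutoff
instance (block : List (String × Int)) (s1 : List String) (s2 : List String) (score_cutoff : Option Int) (out : Int) : Decidable (Spec_block_similarity_py block s1 s2 score_cutoff out) := by unfold Spec_block_similarity_py; infer_instance

-- ===== CLAIM (what is proved, stated in full; the proofs are below) =====
def Claim_equal_block_similarity_py : Prop := ∀ (block : List (String × Int)) (s1 : List String) (s2 : List String) (score_cutoff : Option Int), Dom_block_similarity_py block s1 s2 score_cutoff → Spec_block_similarity_py block s1 s2 score_cutoff (block_similarity_py block s1 s2 score_cutoff)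

-- ===== LEMMAS AND PROOFS =====

-- Python bit i of an arbitrary int (two's complement)
def pvBit (M : Int) (i : Nat) : Bool := decide (PySem.Int.band (M >>> i) 1 = 1)

-- bit vectors, least-significant first
def pvOfBits : List Bool → Nat
  | [] => 0
  | b :: bs => b.toNat + 2 * pvOfBits bs

-- the match mask restricted to the state bits, the "S & ~M" part, the final carry,
-- and one step of the bit-parallel loop, all at bit-list level
def pvU (M : Int) : Nat → List Bool → List Bool
  | _, [] => []
  | i, s :: ss => (s && pvBit M i) :: pvU M (i + 1) ss

def pvD (M : Int) : Nat → List Bool → List Bool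
  | _, [] => []
  | i, s :: ss => (s && !pvBit M i) :: pvD M (i + 1) ss

def pvC (M : Int) : Nat → Bool → List Bool → Bool
  | _, c, [] => c
  | i, c, s :: ss => pvC M (i + 1) (s && (pvBit M i || c)) ss

def pvStep (M : Int) : Nat → Bool → List Bool → List Bool
  | _, _, [] => []
  | i, c, s :: ss => ((s && !pvBit M i) || c) :: pvStep M (i + 1) (s && (pvBit M i || c)) ss

-- DP row read off a difference-bit vector: bit = true means "no increment"
def pvRowFrom (base : Int) : List Bool → List Int
  | [] => []
  | s :: ss => (base + (if s then 0 else 1)) :: pvRowFrom (base + (if s then 0 else 1)) ss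

-- LSB-first binary digits
def pvBinLSB (n : Nat) : List Char :=
  if n = 0 then [] else (if n % 2 = 1 then '1' else '0') :: pvBinLSB (n / 2)

lemma pvStep_length (M : Int) : ∀ (ss : List Bool) (i : Nat) (c : Bool), (pvStep M i c ss).length = ss.length := by
  intro ss; induction ss with
  | nil => intro i c; rfl
  | cons s ss ih => intro i c; simp [pvStep, ih]

lemma pvU_length (M : Int) : ∀ (ss : List Bool) (i : Nat), (pvU M i ss).length = ss.length := by
  intro ss; induction ss with
  | nil => intro i; rfl
  | cons s ss ih => intro i; simp [pvU, ih]

lemma pvD_length (M : Int) : ∀ (ss : List Bool) (i : Nat), (pvD M i ss).length = ss.length := by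
  intro ss; induction ss with
  | nil => intro i; rfl
  | cons s ss ih => intro i; simp [pvD, ih]

lemma pvU_getD (M : Int) : ∀ (ss : List Bool) (i j : Nat), (pvU M i ss).getD j false = (ss.getD j false && pvBit M (i + j)) := by
  intro ss; induction ss with
  | nil => intro i j; simp [pvU]
  | cons s ss ih =>
    intro i j
    show ((s && pvBit M i) :: pvU M (i + 1) ss).getD j false = _
    cases j with
    | zero => simp
    | succ j =>
      rw [List.getD_cons_succ, ih (i+1) j]
      have h : i + 1 + j = i + (j + 1) := by omega
      rw [h, List.getD_cons_succ]

lemma pvD_getD (M : Int) : ∀ (ss : List Bool) (i j : Nat), (pvD M i ss).getD j false = (ss.getD j false && !pvBit M (i + j)) := by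
  intro ss; induction ss with
  | nil => intro i j; simp [pvD]
  | cons s ss ih =>
    intro i j
    show ((s && !pvBit M i) :: pvD M (i + 1) ss).getD j false = _
    cases j with
    | zero => simp
    | succ j =>
      rw [List.getD_cons_succ, ih (i+1) j]
      have h : i + 1 + j = i + (j + 1) := by omega
      rw [h, List.getD_cons_succ]

lemma pvOfBits_lt : ∀ (ss : List Bool), pvOfBits ss < 2 ^ ss.length := by
  intro ss; induction ss with
  | nil => simp [pvOfBits]
  | cons s ss ih => cases s <;> simp [pvOfBits, Nat.pow_succ] <;> omega

lemma pvOfBits_testBit : ∀ (ss : List Bool) (j : Nat), (pvOfBits ss).testBit j = ss.getD j false := by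
  intro ss; induction ss with
  | nil => intro j; simp [pvOfBits]
  | cons s ss ih =>
    intro j
    have hb : pvOfBits (s :: ss) = Nat.bit s (pvOfBits ss) := by
      simp [pvOfBits, Nat.bit_val]; ring
    cases j with
    | zero => simp [hb]
    | succ j => simp [hb, Nat.testBit_bit_succ, ih]

-- Python bit semantics of pvBit
lemma pvBit_ofNat (n : Nat) (i : Nat) : pvBit (Int.ofNat n) i = n.testBit i := by
  show decide (PySem.Int.band (Int.ofNat (n >>> i)) 1 = 1) = _
  have h1 : PySem.Int.band (Int.ofNat (n >>> i)) 1 = ((n >>> i) &&& 1 : Nat) := by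
    simpa using PySem.Int.band_natCast (n >>> i) 1
  rw [h1]
  have h2 : (n >>> i) &&& 1 = (n >>> i) % 2 := Nat.and_one_is_mod _
  rw [h2]
  simp only [Nat.cast_eq_one]
  rw [Nat.testBit_eq_decide_div_mod_eq, ← Nat.shiftRight_eq_div_pow]

lemma pvBit_negSucc (n : Nat) (i : Nat) : pvBit (Int.negSucc n) i = !(n.testBit i) := by
  show decide (PySem.Int.band (Int.negSucc (n >>> i)) 1 = 1) = _
  have hneg : ¬ (0 ≤ Int.negSucc (n >>> i)) := by
    have := Int.negSucc_lt_zero (n >>> i); omega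
  have harg : (-(Int.negSucc (n >>> i)) - 1).toNat = n >>> i := by
    rw [Int.negSucc_eq]; omega
  have h1 : PySem.Int.band (Int.negSucc (n >>> i)) 1 = ((1 - (1 &&& (n >>> i)) : Nat) : Int) := by
    unfold PySem.Int.band
    rw [if_neg hneg, if_pos (by norm_num : (0:Int) ≤ 1), harg]
    norm_num
  rw [h1]
  have h2 : 1 &&& (n >>> i) = (n >>> i) % 2 := by
    rw [Nat.and_comm]; exact Nat.and_one_is_mod _
  rw [h2]
  rw [Nat.testBit_eq_decide_div_mod_eq, ← Nat.shiftRight_eq_div_pow]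
  rcases Nat.mod_two_eq_zero_or_one (n >>> i) with h3 | h3 <;> simp [h3]

-- a - (a AND b) is the bitwise difference
lemma pv_ldiff_add_and : ∀ (a b : Nat), a.ldiff b + (a &&& b) = a := by
  intro a
  induction a using Nat.binaryRec with
  | zero =>
    intro b
    have h1 : Nat.ldiff 0 b = 0 := by
      apply Nat.eq_of_testBit_eq; intro i; simp [Nat.testBit_ldiff]
    simp [h1]
  | bit x a' ih =>
    intro b
    conv_lhs => rw [← Nat.bit_testBit_zero_shiftRight_one b]
    rw [Nat.ldiff_bit, Nat.land_bit, Nat.bit_val, Nat.bit_val, Nat.bit_val]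
    have h := ih (b >>> 1)
    cases x <;> cases hb : b.testBit 0 <;> simp [Bool.toNat] <;> omega

-- S & M for nonnegative S and arbitrary (possibly negative) M
lemma pv_band_spec (sN : Nat) (M : Int) :
    ∃ uN : Nat, PySem.Int.band (sN : Int) M = (uN : Int) ∧ uN ≤ sN ∧
      ∀ j, uN.testBit j = (sN.testBit j && pvBit M j) := by
  cases M with
  | ofNat n =>
    refine ⟨sN &&& n, ?_, Nat.and_le_left, ?_⟩
    · exact PySem.Int.band_natCast sN n
    · intro j; rw [Nat.testBit_land, pvBit_ofNat]
  | negSucc n =>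
    have hd := pv_ldiff_add_and sN n
    refine ⟨sN.ldiff n, ?_, by omega, ?_⟩
    · have hneg : ¬ (0 ≤ Int.negSucc n) := by
        have := Int.negSucc_lt_zero n; omega
      have harg : (-(Int.negSucc n) - 1).toNat = n := by
        rw [Int.negSucc_eq]; omega
      have hpos : (0 : Int) ≤ (sN : Int) := by positivity
      unfold PySem.Int.band
      rw [if_pos hpos, if_neg hneg, harg]
      norm_num
      omega
    · intro j; rw [Nat.testBit_ldiff, pvBit_negSucc]

-- low bits of an OR
lemma pv_mod_lor (a b k : Nat) : (a ||| b) % 2 ^ k = a % 2 ^ k ||| b % 2 ^ k := by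
  apply Nat.eq_of_testBit_eq
  intro i
  simp only [Nat.testBit_mod_two_pow, Nat.testBit_lor]
  by_cases h : i < k <;> simp [h]

-- carry/borrow identity of the bit-parallel step, at bit-list level
lemma pvL : ∀ (ss : List Bool) (M : Int) (i : Nat) (c : Bool),
    (pvOfBits ss + pvOfBits (pvU M i ss) + c.toNat) ||| pvOfBits (pvD M i ss)
      = pvOfBits (pvStep M i c ss) + 2 ^ ss.length * (pvC M i c ss).toNat := by
  intro ss M
  induction ss with
  | nil => intro i c; cases c <;> simp [pvOfBits, pvU, pvD, pvC, pvStep]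
  | cons s ss ih =>
    intro i c
    have hbitform : pvOfBits (s :: ss) + pvOfBits (pvU M i (s :: ss)) + c.toNat
        = Nat.bit ((s && !pvBit M i).xor c)
            (pvOfBits ss + pvOfBits (pvU M (i+1) ss) + (s && (pvBit M i || c)).toNat) := by
      show s.toNat + 2 * pvOfBits ss + ((s && pvBit M i).toNat + 2 * pvOfBits (pvU M (i+1) ss)) + c.toNat = _
      rw [Nat.bit_val]
      cases s <;> cases pvBit M i <;> cases c <;> simp <;> omega
    have hdform : pvOfBits (pvD M i (s :: ss)) = Nat.bit (s && !pvBit M i) (pvOfBits (pvD M (i+1) ss)) := by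
      show (s && !pvBit M i).toNat + 2 * pvOfBits (pvD M (i+1) ss) = _
      rw [Nat.bit_val]; omega
    rw [hbitform, hdform, Nat.lor_bit, ih (i+1) (s && (pvBit M i || c))]
    have hx : (((s && !pvBit M i).xor c) || (s && !pvBit M i)) = ((s && !pvBit M i) || c) := by
      cases s <;> cases pvBit M i <;> cases c <;> rfl
    rw [hx]
    show _ = (((s && !pvBit M i) || c)).toNat + 2 * pvOfBits (pvStep M (i+1) (s && (pvBit M i || c)) ss)
          + 2 ^ (s :: ss).length * (pvC M (i+1) (s && (pvBit M i || c)) ss).toNat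
    rw [Nat.bit_val]
    cases pvC M (i+1) (s && (pvBit M i || c)) ss <;>
      simp [List.length_cons, Nat.pow_succ] <;> omega

-- one step of A's loop, on the embedded Nat state
lemma pv_stepA (m : Nat) (sN : Nat) (ss : List Bool) (M : Int)
    (hlen : ss.length = m) (hmod : sN % 2 ^ m = pvOfBits ss) :
    ∃ sN' : Nat,
      PySem.Int.bor ((sN : Int) + PySem.Int.band (sN : Int) M) ((sN : Int) - PySem.Int.band (sN : Int) M) = (sN' : Int) ∧
      sN ≤ sN' ∧ sN' % 2 ^ m = pvOfBits (pvStep M 0 false ss) := by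
  obtain ⟨uN, hu, hule, hubit⟩ := pv_band_spec sN M
  -- Nat views of the three bit-lists
  have hUlt := pvOfBits_lt (pvU M 0 ss)
  have hDlt := pvOfBits_lt (pvD M 0 ss)
  have hUlen := pvU_length M ss 0
  have hDlen := pvD_length M ss 0
  have hSlen := pvStep_length M ss 0 false
  -- test bits of sN below m are the bits of ss
  have hsbit : ∀ j, j < m → sN.testBit j = ss.getD j false := by
    intro j hj
    have h1 : (sN % 2 ^ m).testBit j = sN.testBit j := by
      simp [Nat.testBit_mod_two_pow, hj]
    rw [← h1, hmod, pvOfBits_testBit]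
  -- uN mod 2^m is the bits of pvU
  have humod : uN % 2 ^ m = pvOfBits (pvU M 0 ss) := by
    apply Nat.eq_of_testBit_eq
    intro j
    by_cases hj : j < m
    · simp only [Nat.testBit_mod_two_pow, hj, decide_true, Bool.true_and]
      rw [hubit j, pvOfBits_testBit, pvU_getD, hsbit j hj, Nat.zero_add]
    · have h2 : (pvU M 0 ss).getD j false = false := by
        apply List.getD_eq_default
        omega
      rw [pvOfBits_testBit, h2]
      simp [Nat.testBit_mod_two_pow, hj]
  -- sN - uN is the bitwise difference, its low bits are pvD
  have hand : sN &&& uN = uN := by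
    apply Nat.eq_of_testBit_eq
    intro j
    rw [Nat.testBit_land, hubit j]
    cases h : sN.testBit j <;> simp
  have hsub : sN - uN = sN.ldiff uN := by
    have := pv_ldiff_add_and sN uN
    rw [hand] at this
    omega
  have hdmod : (sN - uN) % 2 ^ m = pvOfBits (pvD M 0 ss) := by
    rw [hsub]
    apply Nat.eq_of_testBit_eq
    intro j
    by_cases hj : j < m
    · simp only [Nat.testBit_mod_two_pow, hj, decide_true, Bool.true_and, Nat.testBit_ldiff]
      rw [hubit j, pvOfBits_testBit, pvD_getD, hsbit j hj, Nat.zero_add]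
      cases ss.getD j false <;> cases pvBit M j <;> rfl
    · have h2 : (pvD M 0 ss).getD j false = false := by
        apply List.getD_eq_default
        omega
      rw [pvOfBits_testBit, h2]
      simp [Nat.testBit_mod_two_pow, hj]
  refine ⟨(sN + uN) ||| (sN - uN), ?_, ?_, ?_⟩
  · rw [hu]
    have h1 : ((sN : Int) + (uN : Int)) = ((sN + uN : Nat) : Int) := by push_cast; ring
    have h2 : ((sN : Int) - (uN : Int)) = ((sN - uN : Nat) : Int) := by
      omega
    rw [h1, h2]
    exact PySem.Int.bor_natCast _ _
  · calc sN ≤ sN + uN := Nat.le_add_right _ _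
      _ ≤ (sN + uN) ||| (sN - uN) := Nat.left_le_or
  · have hL := pvL ss M 0 false
    rw [hlen] at hL
    have hstep_lt : pvOfBits (pvStep M 0 false ss) < 2 ^ m := by
      have := pvOfBits_lt (pvStep M 0 false ss)
      rwa [hSlen, hlen] at this
    have hD_lt : pvOfBits (pvD M 0 ss) < 2 ^ m := by
      have := hDlt; rwa [hDlen, hlen] at this
    calc ((sN + uN) ||| (sN - uN)) % 2 ^ m
        = (sN + uN) % 2 ^ m ||| (sN - uN) % 2 ^ m := pv_mod_lor _ _ _
      _ = (pvOfBits ss + pvOfBits (pvU M 0 ss)) % 2 ^ m ||| pvOfBits (pvD M 0 ss) := by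
          rw [Nat.add_mod, hmod, humod, hdmod]
      _ = ((pvOfBits ss + pvOfBits (pvU M 0 ss) + Bool.toNat false) ||| pvOfBits (pvD M 0 ss)) % 2 ^ m := by
          rw [pv_mod_lor, Nat.mod_eq_of_lt hD_lt]
          simp
      _ = pvOfBits (pvStep M 0 false ss) := by
          rw [hL, Nat.add_mul_mod_self_left, Nat.mod_eq_of_lt hstep_lt]


-- the value at the end of a row built from difference bits
def pvLastRow (b : Int) : List Bool → Int
  | [] => b
  | s :: ss => pvLastRow (b + (if s then 0 else 1)) ss

lemma pvShift (M : Int) (i : Nat) : (M >>> i) >>> (1 : Nat) = M >>> (i + 1) := by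
  cases M with
  | ofNat n =>
    show Int.ofNat ((n >>> i) >>> 1) = Int.ofNat (n >>> (i + 1))
    rw [Nat.shiftRight_add]
  | negSucc n =>
    show Int.negSucc ((n >>> i) >>> 1) = Int.negSucc (n >>> (i + 1))
    rw [Nat.shiftRight_add]

-- one pass of B's inner fold equals the bit-list step read as a row
lemma pvR1 : ∀ (ss : List Bool) (M : Int) (i : Nat) (c : Bool) (base : Int) (acc : List Int),
    (List.zip (base :: pvRowFrom base ss) (pvRowFrom base ss)).foldl
        (fun (st : Int × Int × List Int) p =>
          let prev : Int := if PySem.Int.band st.1 1 = 1 then p.1 + 1 else max st.2.1 p.2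
          (st.1 >>> (1 : Nat), prev, st.2.2 ++ [prev]))
        (M >>> i, base + (c.toNat : Int), acc)
      = (M >>> (i + ss.length), pvLastRow (base + (c.toNat : Int)) (pvStep M i c ss),
          acc ++ pvRowFrom (base + (c.toNat : Int)) (pvStep M i c ss)) := by
  intro ss M
  induction ss with
  | nil => intro i c base acc; simp [pvStep, pvRowFrom, pvLastRow]
  | cons s ss ih =>
    intro i c base acc
    have hv2 : (if PySem.Int.band (M >>> i) 1 = 1 then base + 1
                else max (base + (c.toNat : Int)) (base + (if s then 0 else 1)))
             = base + (c.toNat : Int) + (if ((s && !pvBit M i) || c) then 0 else 1) := by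
      by_cases hb : PySem.Int.band (M >>> i) 1 = 1
      · have hmb : pvBit M i = true := by simp [pvBit, hb]
        rw [if_pos hb, hmb]; cases s <;> cases c <;> simp
      · have hmb : pvBit M i = false := by simp [pvBit, hb]
        rw [if_neg hb, hmb]; cases s <;> cases c <;> simp [max_def]
    have hv1 : base + (c.toNat : Int) + (if ((s && !pvBit M i) || c) then 0 else 1)
             = (base + (if s then 0 else 1)) + (((s && (pvBit M i || c)).toNat : Int)) := by
      cases pvBit M i <;> cases s <;> cases c <;> simp
    show (List.zip
        (base :: (base + (if s then 0 else 1)) :: pvRowFrom (base + (if s then 0 else 1)) ss)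
        ((base + (if s then 0 else 1)) :: pvRowFrom (base + (if s then 0 else 1)) ss)).foldl _ _ = _
    rw [List.zip_cons_cons, List.foldl_cons]
    simp only []
    rw [pvShift M i, hv2, hv1]
    rw [ih (i+1) (s && (pvBit M i || c)) (base + (if s then 0 else 1))]
    rw [← hv1]
    have hidx : i + 1 + ss.length = i + (ss.length + 1) := by omega
    rw [hidx]
    simp only [pvStep, pvRowFrom, pvLastRow, List.length_cons]
    rw [← List.append_cons]

lemma pvRowFrom_replicate : ∀ (m : Nat) (base : Int), pvRowFrom base (List.replicate m true) = List.replicate m base := by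
  intro m; induction m with
  | zero => intro base; rfl
  | succ m ih => intro base; simp [pvRowFrom, List.replicate_succ, ih]

lemma pvOfBits_replicate_true : ∀ (m : Nat), pvOfBits (List.replicate m true) = 2 ^ m - 1 := by
  intro m; induction m with
  | zero => rfl
  | succ m ih =>
    have h1 : 1 ≤ 2 ^ m := Nat.one_le_two_pow
    simp [List.replicate_succ, pvOfBits, ih, Nat.pow_succ]
    omega

lemma pvRowFrom_getElem? : ∀ (ss : List Bool) (base : Int),
    (base :: pvRowFrom base ss)[ss.length]? = some (base + (ss.count false : Int)) := by
  intro ss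
  induction ss with
  | nil => intro base; simp [pvRowFrom]
  | cons s ss ih =>
    intro base
    show ((base + (if s then 0 else 1)) :: pvRowFrom (base + (if s then 0 else 1)) ss)[ss.length]? = _
    rw [ih (base + (if s then 0 else 1))]
    cases s <;> simp [List.count_cons] <;> try ring

-- the two folds advance in lockstep
lemma pv_fold (block : List (String × Int)) (m : Nat) : ∀ (s2 : List String) (sN : Nat) (ss : List Bool),
    ss.length = m → sN % 2 ^ m = pvOfBits ss → 2 ^ m - 1 ≤ sN →
    ∃ (sN' : Nat) (ss' : List Bool),
      ss'.length = m ∧ sN' % 2 ^ m = pvOfBits ss' ∧ 2 ^ m - 1 ≤ sN' ∧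
      s2.foldl (fun S ch2 =>
        let Matches : Int := (block.lookup ch2).getD 0
        let u : Int := PySem.Int.band S Matches
        PySem.Int.bor (S + u) (S - u)) (sN : Int) = (sN' : Int) ∧
      s2.foldl (fun row ch2 =>
        ((List.zip row (PySem.List.slice row (some 1) none)).foldl
          (fun (st : Int × Int × List Int) p =>
            let prev : Int := if PySem.Int.band st.1 1 = 1 then p.1 + 1 else max st.2.1 p.2
            (st.1 >>> (1 : Nat), prev, st.2.2 ++ [prev]))
          ((block.lookup ch2).getD 0, 0, [0])).2.2)
        ((0 : Int) :: pvRowFrom 0 ss) = 0 :: pvRowFrom 0 ss' := by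
  intro s2
  induction s2 with
  | nil =>
    intro sN ss h1 h2 h3
    exact ⟨sN, ss, h1, h2, h3, rfl, rfl⟩
  | cons ch2 s2 ih =>
    intro sN ss h1 h2 h3
    set M : Int := (block.lookup ch2).getD 0 with hM
    obtain ⟨sN', hstep, hle, hmod'⟩ := pv_stepA m sN ss M h1 h2
    have hrow : ((List.zip ((0 : Int) :: pvRowFrom 0 ss)
          (PySem.List.slice ((0 : Int) :: pvRowFrom 0 ss) (some 1) none)).foldl
          (fun (st : Int × Int × List Int) p =>
            let prev : Int := if PySem.Int.band st.1 1 = 1 then p.1 + 1 else max st.2.1 p.2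
            (st.1 >>> (1 : Nat), prev, st.2.2 ++ [prev]))
          (M, 0, [0])).2.2 = (0 : Int) :: pvRowFrom 0 (pvStep M 0 false ss) := by
      rw [PySem.List.slice_from_one, List.tail_cons]
      have hM0 : (M : Int) = M >>> (0 : Nat) := by
        cases M <;> rfl
      rw [hM0]
      have hR := pvR1 ss M 0 false 0 [0]
      simp only [Bool.toNat_false, Nat.cast_zero, add_zero] at hR
      rw [hR]
      simp
    obtain ⟨sN'', ss'', hl, hm, hg, hA, hB⟩ :=
      ih sN' (pvStep M 0 false ss) (by rw [pvStep_length, h1]) hmod' (le_trans h3 hle)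
    refine ⟨sN'', ss'', hl, hm, hg, ?_, ?_⟩
    · rw [List.foldl_cons]
      simp only [← hM]
      rw [hstep]
      exact hA
    · rw [List.foldl_cons]
      simp only [← hM]
      rw [hrow]
      exact hB

-- binary strings: Nat.toDigits 2 is pvBinLSB reversed
lemma pv_toDigitsCore_eq : ∀ (fuel n : Nat) (acc : List Char), 0 < n → n < fuel →
    Nat.toDigitsCore 2 fuel n acc = (pvBinLSB n).reverse ++ acc := by
  intro fuel
  induction fuel with
  | zero => intro n acc h1 h2; omega
  | succ fuel ih =>
    intro n acc h1 h2
    have hdg : Nat.digitChar (n % 2) = (if n % 2 = 1 then '1' else '0') := by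
      rcases Nat.mod_two_eq_zero_or_one n with h | h <;> rw [h] <;> rfl
    have hb : pvBinLSB n = (if n % 2 = 1 then '1' else '0') :: pvBinLSB (n / 2) := by
      rw [pvBinLSB]
      rw [if_neg (by omega)]
    rw [Nat.toDigitsCore]
    by_cases hz : n / 2 = 0
    · have hn1 : n = 1 := by omega
      subst hn1
      simp [hz, hb, pvBinLSB]
      decide
    · rw [if_neg hz]
      rw [ih (n / 2) _ (by omega) (by omega)]
      rw [hb, hdg]
      simp

lemma pvBinLSB_length : ∀ (m n : Nat), 2 ^ m - 1 ≤ n → m ≤ (pvBinLSB n).length := by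
  intro m
  induction m with
  | zero => intro n h; omega
  | succ m ih =>
    intro n h
    have h2 : 2 ^ (m + 1) = 2 * 2 ^ m := by ring
    have hpos : 1 ≤ 2 ^ m := Nat.one_le_two_pow
    have hn : n ≠ 0 := by omega
    rw [pvBinLSB, if_neg hn]
    have := ih (n / 2) (by omega)
    simp
    omega

lemma pvBinLSB_count : ∀ (ss : List Bool) (n : Nat),
    n % 2 ^ ss.length = pvOfBits ss → 2 ^ ss.length - 1 ≤ n →
    List.count '0' (List.take ss.length (pvBinLSB n)) = ss.count false := by
  intro ss
  induction ss with
  | nil => intro n h1 h2; simp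
  | cons s ss ih =>
    intro n h1 h2
    have h2p : 2 ^ (ss.length + 1) = 2 * 2 ^ ss.length := by ring
    have hpos : 1 ≤ 2 ^ ss.length := Nat.one_le_two_pow
    have hofs : pvOfBits (s :: ss) = s.toNat + 2 * pvOfBits ss := rfl
    have hn : n ≠ 0 := by
      simp only [List.length_cons] at h2
      omega
    have hst : s.toNat ≤ 1 := by cases s <;> simp
    have hm2 : n % 2 = s.toNat := by
      have hd : (2 : Nat) ∣ 2 ^ (ss.length + 1) := by
        rw [h2p]; exact Dvd.intro _ rfl
      have := Nat.mod_mod_of_dvd n hd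
      simp only [List.length_cons] at h1
      rw [h1, hofs] at this
      omega
    have hdiv : (n / 2) % 2 ^ ss.length = pvOfBits ss := by
      have hkey : n % (2 * 2 ^ ss.length) / 2 = n / 2 % 2 ^ ss.length :=
        Nat.mod_mul_right_div_self n 2 (2 ^ ss.length)
      simp only [List.length_cons] at h1
      rw [h2p] at h1
      rw [h1, hofs] at hkey
      rw [← hkey]
      cases s <;> simp [Bool.toNat] <;> omega
    have hge2 : 2 ^ ss.length - 1 ≤ n / 2 := by
      simp only [List.length_cons] at h2
      omega
    rw [pvBinLSB, if_neg hn]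
    simp only [List.length_cons, List.take_succ_cons]
    rw [List.count_cons]
    rw [ih (n / 2) hdiv hge2]
    rw [List.count_cons]
    cases s <;> simp [hm2]

-- Str.count with a single-character needle is List.count
lemma pv_count_go_single (c : Char) : ∀ (l : List Char) (fuel acc : Nat), l.length ≤ fuel →
    PySem.Chars.count.go [c] fuel l acc = acc + l.count c := by
  intro l
  induction l with
  | nil =>
    intro fuel acc h
    cases fuel <;> simp [PySem.Chars.count.go]
  | cons x t ih =>
    intro fuel acc h
    cases fuel with
    | zero => simp at h
    | succ fuel =>
      rw [PySem.Chars.count.go]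
      by_cases hc : c = x
      · subst hc
        have hpre : [c].isPrefixOf (c :: t) = true := by simp [List.isPrefixOf]
        rw [if_pos hpre]
        simp only [List.length_singleton, List.drop_succ_cons, List.drop_zero]
        rw [ih fuel (acc + 1) (by simpa using h)]
        rw [List.count_cons]
        simp
        omega
      · have hpre : [c].isPrefixOf (x :: t) = false := by
          simp [List.isPrefixOf]
          exact fun hh => hc hh
        rw [if_neg (by simp [hpre])]
        rw [ih fuel acc (by simpa using h)]
        rw [List.count_cons]
        have : (x == c) = false := by
          simp only [beq_eq_false_iff_ne]
          exact fun hh => hc hh.symm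
        simp [this]

-- A's popcount expression extracts the row total
lemma pv_res (m : Nat) (hm : 0 < m) (sN : Nat) (ss : List Bool)
    (hlen : ss.length = m) (hmod : sN % 2 ^ m = pvOfBits ss) (hge : 2 ^ m - 1 ≤ sN) :
    (PySem.Str.count (PySem.Str.slice (PySem.Int.pyBin (sN : Int)) (some (-(m : Int))) none) "0" : Nat)
      = ss.count false := by
  have hpos : 0 < sN := by
    have : 1 ≤ 2 ^ m := Nat.one_le_two_pow
    have : 2 ≤ 2 ^ m := by
      calc 2 = 2 ^ 1 := rfl
        _ ≤ 2 ^ m := Nat.pow_le_pow_right (by omega) hm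
    omega
  -- the character list behind bin(S)
  have hchars : (PySem.Int.pyBin (sN : Int)).toList = '0' :: 'b' :: (pvBinLSB sN).reverse := by
    rw [PySem.Int.toList_pyBin]
    unfold PySem.Int.toBinChars0b
    rw [if_neg (by omega : ¬ ((sN : Int) < 0))]
    have h1 : ((sN : Int)).toNat = sN := rfl
    rw [h1]
    have h2 : Nat.toDigits 2 sN = (pvBinLSB sN).reverse ++ [] :=
      pv_toDigitsCore_eq (sN + 1) sN [] hpos (by omega)
    rw [h2]
    simp
  have hL : m ≤ (pvBinLSB sN).length := pvBinLSB_length m sN hge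
  -- count over strings is count over the char list
  rw [PySem.Str.count_eq, PySem.Str.toList_slice, PySem.Chars.slice_eq_listSlice, hchars]
  rw [PySem.List.slice_from_neg_natCast _ m hm]
  have hlen2 : ('0' :: 'b' :: (pvBinLSB sN).reverse).length - m
      = ((pvBinLSB sN).length - m) + 2 := by
    simp
    omega
  rw [hlen2]
  simp only [List.drop_succ_cons]
  rw [List.drop_reverse]
  have htake : (pvBinLSB sN).length - ((pvBinLSB sN).length - m) = m := by omega
  rw [htake]
  -- single-character count is List.count
  have hone : ("0" : String).toList = ['0'] := by decide
  rw [hone]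
  unfold PySem.Chars.count
  rw [if_neg (by decide)]
  rw [pv_count_go_single '0' _ _ 0 (by simp)]
  rw [Nat.zero_add, List.count_reverse]
  rw [← hlen]
  have hmod' : sN % 2 ^ ss.length = pvOfBits ss := by rw [hlen]; exact hmod
  have hge' : 2 ^ ss.length - 1 ≤ sN := by rw [hlen]; exact hge
  exact pvBinLSB_count ss sN hmod' hge' 

-- ===== VERDICT (by name: the statement is the Claim_ definition above) =====
theorem block_similarity_py_spec : Claim_equal_block_similarity_py := by
  unfold Claim_equal_block_similarity_py
  intro block s1 s2 sc hdom
  unfold Spec_block_similarity_py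
  unfold block_similarity_py block_similarity_py_alt
  by_cases h1 : s1 = []
  · rw [if_pos h1, if_pos h1]
  · rw [if_neg h1, if_neg h1]
    have hmpos : 0 < s1.length := List.length_pos_iff.mpr h1
    have hpow1 : 1 ≤ 2 ^ s1.length := Nat.one_le_two_pow
    have hinit_val : (((1 <<< s1.length : Nat) : Int)) - 1 = ((2 ^ s1.length - 1 : Nat) : Int) := by
      rw [Nat.one_shiftLeft]
      omega
    have hmod0 : (2 ^ s1.length - 1) % 2 ^ s1.length = pvOfBits (List.replicate s1.length true) := by
      rw [pvOfBits_replicate_true]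
      exact Nat.mod_eq_of_lt (by omega)
    obtain ⟨sN', ss', hl, hmd, hg, hA, hB⟩ :=
      pv_fold block s1.length s2 (2 ^ s1.length - 1) (List.replicate s1.length true)
        (List.length_replicate) hmod0 (le_refl _)
    have hrow0 : List.replicate (s1.length + 1) (0 : Int)
        = 0 :: pvRowFrom 0 (List.replicate s1.length true) := by
      rw [pvRowFrom_replicate, List.replicate_succ]
    rw [hinit_val, hA, hrow0, hB]
    have hres := pv_res s1.length hmpos sN' ss' hl hmd hg
    have hrowval := pvRowFrom_getElem? ss' 0
    rw [hl] at hrowval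
    simp only [PySem.List.pyGet?_natCast, hrowval, hres, Option.getD_some, Int.zero_add]
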